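-- pv_equiv track=rewrite | github.com/cmalek/wyrdcraeft | scripts/quality/check_napoleon_gate.py | _has_doc_comment
-- ===== SOURCE A (Python) =====
-- def _has_doc_comment(lines: list[str], lineno: int) -> bool:
--     """Check for a Napoleon ``#:`` doc comment inline or directly above."""
--     if lineno <= 0 or lineno > len(lines):
--         return False
--
--     current = lines[lineno - 1]
--     if "#:" in current:
--         return True
--
--     index = lineno - 2
--     while index >= 0:
--         text = lines[index].strip()
--         if not text:
--             index -= 1
--             continue
--         if text.startswith("#:"):
--             return True
--         if text.startswith("#"):
--             index -= 1
--             continue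
--         break
--     return False
-- ===== SOURCE B (Python) =====
-- def _has_doc_comment(lines: list[str], lineno: int) -> bool:
--     """Check for a Napoleon ``#:`` doc comment inline or directly above."""
--     if lineno <= 0 or lineno > len(lines):
--         return False
--     if "#:" in lines[lineno - 1]:
--         return True
--     # Forward pass: `found` records whether a ``#:`` comment has been seen
--     # since the last barrier (non-blank, non-comment) line; blanks and plain
--     # comments carry it along, a barrier resets it.
--     found = False
--     for line in lines[: lineno - 1]:
--         text = line.strip()
--         if not text:
--             continue
--         if text.startswith("#:"):
--             found = True
--         elif not text.startswith("#"):
--             found = False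
--     return found
-- ===== Notes on version B (the rewrite author's own statement) =====
-- stated objective: alternative
-- what changed: A scans backward from the target line and early-breaks at the first non-comment line; B instead makes one forward pass over the whole prefix with a boolean accumulator that is set by '#:' comment lines and reset by barrier lines, so the value at the end is exactly 'some #: comment sits in the contiguous blank/comment block directly above'.
import Mathlib
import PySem

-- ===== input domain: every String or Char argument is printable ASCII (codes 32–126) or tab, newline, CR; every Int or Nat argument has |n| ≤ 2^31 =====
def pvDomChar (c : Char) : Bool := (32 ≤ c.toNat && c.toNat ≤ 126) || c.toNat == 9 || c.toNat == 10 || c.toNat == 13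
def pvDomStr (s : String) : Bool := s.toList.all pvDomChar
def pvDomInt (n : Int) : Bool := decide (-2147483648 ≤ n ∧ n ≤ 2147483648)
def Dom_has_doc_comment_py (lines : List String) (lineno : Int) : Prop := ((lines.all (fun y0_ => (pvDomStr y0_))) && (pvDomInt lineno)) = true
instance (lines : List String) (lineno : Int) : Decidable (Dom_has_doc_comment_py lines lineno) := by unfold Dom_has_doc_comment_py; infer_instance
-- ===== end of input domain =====

-- B replaces A's backward early-break scan by a single FORWARD fold over the prefix
-- with a boolean accumulator (set by '#:' lines, reset by barrier lines) — alternative decomposition.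

-- ===== PORT A =====
-- A's while-loop: fuel n = index + 1, so `n+1` runs the body at index n and recurses downward.
def hdcLoopA (lines : List String) : Nat → Bool
  | 0 => false
  | n+1 =>
    let text := PySem.Str.strip ((PySem.List.pyGet? lines ((n : Nat) : Int)).getD "")
    if text = "" then hdcLoopA lines n
    else if PySem.Str.startswith text "#:" then true
    else if PySem.Str.startswith text "#" then hdcLoopA lines n
    else false

def has_doc_comment_py (lines : List String) (lineno : Int) : Bool :=
  if lineno ≤ 0 ∨ lineno > (lines.length : Int) then false
  else
    let current := (PySem.List.pyGet? lines (lineno - 1)).getD ""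
    if PySem.Str.isIn "#:" current then true
    else hdcLoopA lines (lineno - 1).toNat

-- ===== PORT B =====
-- one step of B's forward loop body
def hdcStep (found : Bool) (line : String) : Bool :=
  let text := PySem.Str.strip line
  if text = "" then found
  else if PySem.Str.startswith text "#:" then true
  else if PySem.Str.startswith text "#" then found
  else false

def has_doc_comment_py_alt (lines : List String) (lineno : Int) : Bool :=
  if lineno ≤ 0 ∨ lineno > (lines.length : Int) then false
  else if PySem.Str.isIn "#:" ((PySem.List.pyGet? lines (lineno - 1)).getD "") then true
  else (PySem.List.slice lines none (some (lineno - 1))).foldl hdcStep false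

-- ===== PRECONDITION & SPEC =====
def Spec_has_doc_comment_py (lines : List String) (lineno : Int) (out : Bool) : Prop := out = has_doc_comment_py_alt lines lineno
instance (lines : List String) (lineno : Int) (out : Bool) : Decidable (Spec_has_doc_comment_py lines lineno out) := by unfold Spec_has_doc_comment_py; infer_instance

-- ===== CLAIM (what is proved, stated in full; the proofs are below) =====
def Claim_equal_has_doc_comment_py : Prop := ∀ (lines : List String) (lineno : Int), Dom_has_doc_comment_py lines lineno → Spec_has_doc_comment_py lines lineno (has_doc_comment_py lines lineno)

-- ===== LEMMAS AND PROOFS =====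

lemma hdcLoopA_eq_foldl (lines : List String) (n : Nat) (hn : n ≤ lines.length) :
    hdcLoopA lines n = (lines.take n).foldl hdcStep false := by
  induction n with
  | zero => simp [hdcLoopA]
  | succ n ih =>
    have hlt : n < lines.length := hn
    have htake : lines.take (n+1) = lines.take n ++ [lines[n]] := by
      rw [List.take_add_one]
      simp [List.getElem?_eq_getElem hlt]
    have hget : (PySem.List.pyGet? lines ((n : Nat) : Int)).getD "" = lines[n] := by
      simp [PySem.List.pyGet?_natCast, List.getElem?_eq_getElem hlt]
    rw [htake, List.foldl_append, ← ih hlt.le]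
    simp only [hdcLoopA, hdcStep, hget, List.foldl]

-- ===== VERDICT (by name: the statement is the Claim_ definition above) =====
theorem has_doc_comment_py_spec : Claim_equal_has_doc_comment_py := by
  intro lines lineno _
  unfold Spec_has_doc_comment_py has_doc_comment_py has_doc_comment_py_alt
  split_ifs with hg hin
  · rfl
  · simp only [if_pos hin]
  · have hg' := not_or.mp hg
    simp only [if_neg hin]
    rw [PySem.List.slice_to lines (by omega : (0:Int) ≤ lineno - 1)]
    exact hdcLoopA_eq_foldl lines (lineno - 1).toNat (by omega)
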